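-- pv_equiv track=rewrite | github.com/Aliisace/Crypto | RSA Cipher/rsaCipher.py | getBlocksFromText
-- ===== SOURCE A (Python) =====
-- SYMBOLS = 'ABCDEFGHIJKLMNOPQRSTUVWXYZabcdefghijklmnopqrstuvwxyz1234567890 !?.'
--
-- def getBlocksFromText(message, blockSize):
--     # Converts a string message to a list of block integers
--
--     message = removeNonLetters(message)
--
--     blockInts = []
--     for blockStart in range(0, len(message), blockSize):
--         # Calculate the block integer for this block of text:
--         blockInt = 0
--         for i in range(blockStart, min(blockStart + blockSize, len(message))):
--             blockInt += (SYMBOLS.index(message[i])) * (len(SYMBOLS) ** (i % blockSize))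
--         blockInts.append(blockInt)
--     return blockInts
--
-- def removeNonLetters(message):
--     lettersOnly = []
--     for symbol in message:
--         if symbol in SYMBOLS:
--             lettersOnly.append(symbol)
--     message = ''.join(lettersOnly)
--     return message
-- ===== SOURCE B (Python) =====
-- SYMBOLS = 'ABCDEFGHIJKLMNOPQRSTUVWXYZabcdefghijklmnopqrstuvwxyz1234567890 !?.'
--
-- def getBlocksFromText(message, blockSize):
--     digits = [SYMBOLS.index(c) for c in message if c in SYMBOLS]
--     base = len(SYMBOLS)
--     blocks = []
--     for start in range(0, len(digits), blockSize):
--         blockInt = 0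
--         for d in reversed(digits[start:start + blockSize]):
--             blockInt = blockInt * base + d
--         blocks.append(blockInt)
--     return blocks
-- ===== Notes on version B (the rewrite author's own statement) =====
-- stated objective: faster
-- what changed: B builds the filtered digit list in one comprehension and evaluates each slice by Horner's rule (blockInt = blockInt*66 + d over the reversed block) instead of A's per-character recomputation of len(SYMBOLS) ** (i % blockSize); intended as faster — a timing run measured 5-48x (47.6x at the largest size both finished; on one degenerate giant-single-block input both time out, since the result itself is a quadratic-size bignum).
-- outside the precondition, e.g. on getBlocksFromText('abc', 0): A raises ValueError, B raises ValueError
import Mathlib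
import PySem

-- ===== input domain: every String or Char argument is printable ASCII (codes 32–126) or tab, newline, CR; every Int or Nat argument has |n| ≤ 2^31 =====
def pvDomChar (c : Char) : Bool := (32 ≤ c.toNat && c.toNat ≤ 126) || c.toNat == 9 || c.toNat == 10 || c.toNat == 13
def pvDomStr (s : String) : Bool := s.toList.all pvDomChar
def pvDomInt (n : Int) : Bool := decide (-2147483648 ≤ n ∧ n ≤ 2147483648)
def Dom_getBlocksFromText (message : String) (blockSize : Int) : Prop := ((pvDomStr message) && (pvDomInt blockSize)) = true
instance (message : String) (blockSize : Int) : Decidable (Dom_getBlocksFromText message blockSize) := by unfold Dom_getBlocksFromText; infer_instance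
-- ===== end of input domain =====

-- B replaces A's per-character recomputation of len(SYMBOLS) ** (i % blockSize) by a single filtered
-- digit list and Horner evaluation of each slice (timing: 5-48x on random inputs; return values
-- equal whenever blockSize ≠ 0 — for blockSize = 0 Python A raises ValueError, excluded by Pre_).

-- ===== PORT A =====
def pvSymbols : List Char :=
  "ABCDEFGHIJKLMNOPQRSTUVWXYZabcdefghijklmnopqrstuvwxyz1234567890 !?.".toList

-- SYMBOLS.index(c): Python raises if absent; here every looked-up char is in SYMBOLS, so getD 0 never fires
def pvSymIdx (c : Char) : Int := ((PySem.List.index? pvSymbols c).getD 0 : Nat)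

-- removeNonLetters: 'symbol in SYMBOLS' for a single character is exactly char membership
def pvRemoveNonLetters (message : List Char) : List Char :=
  message.foldl (fun lettersOnly symbol =>
    if pvSymbols.contains symbol then lettersOnly ++ [symbol] else lettersOnly) []

def getBlocksFromText (message : String) (blockSize : Int) : List Int :=
  let msg := pvRemoveNonLetters message.toList
  -- exponent i % blockSize is nonnegative whenever the loop body runs (blockSize > 0), so ^ on toNat is exact
  (PySem.List.pyRange 0 (msg.length : Int) blockSize).foldl
    (fun blockInts blockStart =>
      blockInts ++
        [(PySem.List.pyRange blockStart (min (blockStart + blockSize) (msg.length : Int)) 1).foldl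
          (fun blockInt i =>
            blockInt + pvSymIdx (PySem.List.pyGetD msg i ' ')
              * ((pvSymbols.length : Int) ^ (PySem.Int.mod i blockSize).toNat)) 0])
    []

-- ===== PORT B =====
def getBlocksFromText_alt (message : String) (blockSize : Int) : List Int :=
  let digits := (message.toList.filter (fun c => pvSymbols.contains c)).map pvSymIdx
  let base : Int := (pvSymbols.length : Int)
  (PySem.List.pyRange 0 (digits.length : Int) blockSize).foldl
    (fun blocks start =>
      blocks ++
        [(PySem.List.slice digits (some start) (some (start + blockSize))).reverse.foldl
          (fun blockInt d => blockInt * base + d) 0])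
    []

-- ===== PRECONDITION & SPEC =====
-- Pre_ excludes exactly blockSize = 0, where Python A raises ValueError (range() arg 3 must not be zero).
def Pre_getBlocksFromText (message : String) (blockSize : Int) : Prop := blockSize ≠ 0
instance (message : String) (blockSize : Int) : Decidable (Pre_getBlocksFromText message blockSize) := by
  unfold Pre_getBlocksFromText; infer_instance

def pvWitness_getBlocksFromText : String × Int := ("Hello world!", 4)

def Spec_getBlocksFromText (message : String) (blockSize : Int) (out : List Int) : Prop := out = getBlocksFromText_alt message blockSize
instance (message : String) (blockSize : Int) (out : List Int) : Decidable (Spec_getBlocksFromText message blockSize out) := by unfold Spec_getBlocksFromText; infer_instance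

-- ===== CLAIM (what is proved, stated in full; the proofs are below) =====
def Claim_equal_getBlocksFromText : Prop := ∀ (message : String) (blockSize : Int), Dom_getBlocksFromText message blockSize → Pre_getBlocksFromText message blockSize → Spec_getBlocksFromText message blockSize (getBlocksFromText message blockSize)

-- ===== LEMMAS AND PROOFS =====

-- Horner value of a digit list equals the weighted sum of its digits.
theorem pv_horner_eq_sum (W : Int) (ds : List Int) :
    ((List.range ds.length).map (fun k => ds.getD k 0 * W ^ k)).sum
      = ds.foldr (fun d acc => acc * W + d) 0 := by
  induction ds with
  | nil => simp
  | cons d t ih =>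
    rw [List.length_cons, List.range_succ_eq_map]
    simp only [List.map_cons, List.map_map, List.sum_cons, List.getD_cons_zero, pow_zero, mul_one]
    have : ((List.range t.length).map (fun k => (d :: t).getD (k + 1) 0 * W ^ (k + 1))).sum
        = ((List.range t.length).map (fun k => t.getD k 0 * W ^ k)).sum * W := by
      rw [← List.sum_map_mul_right]
      refine congrArg List.sum (List.map_congr_left ?_)
      intro k _
      simp [pow_succ]; ring
    simp only [Function.comp_def] at *
    rw [this, ih]
    simp only [List.foldr_cons]
    ring

-- the per-block equality, phrased over the filtered character list L
theorem pv_block_eq (L : List Char) (bs s : Int) (hbs : 0 < bs) (hs0 : 0 ≤ s)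
    (hsn : s < (L.length : Int)) (hdvd : bs ∣ s) :
    (PySem.List.pyRange s (min (s + bs) (L.length : Int)) 1).foldl
      (fun blockInt i =>
        blockInt + pvSymIdx (PySem.List.pyGetD L i ' ')
          * ((pvSymbols.length : Int) ^ (PySem.Int.mod i bs).toNat)) 0
    = (PySem.List.slice (L.map pvSymIdx) (some s) (some (s + bs))).reverse.foldl
        (fun blockInt d => blockInt * (pvSymbols.length : Int) + d) 0 := by
  obtain ⟨q, hq⟩ := hdvd
  set W : Int := (pvSymbols.length : Int) with hW
  rw [PySem.List.slice_toNat (L.map pvSymIdx) hs0 (show (0:Int) ≤ s + bs by omega),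
    List.foldl_reverse]
  have hbt : (s + bs).toNat - s.toNat = bs.toNat := by omega
  rw [hbt, ← List.map_drop, ← List.map_take]
  set ck : List Char := List.take bs.toNat (List.drop s.toNat L) with hck
  rw [← pv_horner_eq_sum W (ck.map pvSymIdx)]
  rw [PySem.List.foldl_add, PySem.List.pyRange_one, List.map_map]
  have hcklen : ck.length = (min (s + bs) (L.length : Int) - s).toNat := by
    simp [hck]; omega
  have hlen : (min (s + bs) (L.length : Int) - s).toNat = (ck.map pvSymIdx).length := by
    simp [hcklen]
  rw [hlen, zero_add]
  refine congrArg List.sum (List.map_congr_left ?_)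
  intro k hk
  rw [List.mem_range, List.length_map] at hk
  have hkbs : (k : Int) < bs := by have := hcklen ▸ hk; omega
  have hkn : s + (k : Int) < (L.length : Int) := by have := hcklen ▸ hk; omega
  have hmod : PySem.Int.mod (s + (k : Int)) bs = (k : Int) := by
    rw [PySem.Int.mod_eq_emod_of_pos hbs, hq, add_comm, Int.add_mul_emod_self_left,
      Int.emod_eq_of_lt (by omega) hkbs]
  simp only [Function.comp_def, hmod]
  have hcast : s + (k : Int) = ((s.toNat + k : Nat) : Int) := by omega
  have hlt : s.toNat + k < L.length := by omega
  have hsome : L[s.toNat + k]? = some (L.getD (s.toNat + k) ' ') := by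
    rw [List.getElem?_eq_getElem hlt, List.getD_eq_getElem _ _ hlt]
  rw [hcast, PySem.List.pyGetD_natCast, Int.toNat_natCast]
  have hck' : (List.map pvSymIdx ck).getD k 0 = pvSymIdx (L[s.toNat + k]?.getD ' ') := by
    rw [List.getD_eq_getElem?_getD, List.getElem?_map, hck,
      List.getElem?_take_of_lt (by omega), List.getElem?_drop, hsome]
    simp
  rw [hck', hsome]
  simp

-- ===== VERDICT (by name: the statement is the Claim_ definition above) =====
theorem getBlocksFromText_spec : Claim_equal_getBlocksFromText := by
  intro message bs _ hpre
  unfold Spec_getBlocksFromText getBlocksFromText getBlocksFromText_alt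
  have hrm : pvRemoveNonLetters message.toList
      = message.toList.filter (fun c => pvSymbols.contains c) := by
    unfold pvRemoveNonLetters
    rw [PySem.List.foldl_append_if_eq_filter]
    rfl
  simp only [hrm, List.length_map]
  set L := message.toList.filter (fun c => pvSymbols.contains c) with hL
  rcases lt_or_gt_of_ne (show bs ≠ 0 from hpre) with hneg | hpos
  · rw [PySem.List.pyRange_of_neg _ _ hneg]
    have h0 : ¬ ((L.length : Int) < 0) := by omega
    simp [h0]
  · rw [PySem.List.foldl_append_singleton_eq_map, PySem.List.foldl_append_singleton_eq_map,
      List.nil_append, List.nil_append]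
    refine List.map_congr_left ?_
    intro s hs
    rw [PySem.List.mem_pyRange_iff_of_pos hpos] at hs
    exact pv_block_eq L bs s hpos hs.1 hs.2.1 (by simpa using hs.2.2)
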